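-- pv_equiv track=rewrite | github.com/tensorflow/tensorflow | tensorflow/python/autograph/tests/loop_basic_test.py | successive_while_loops
-- ===== SOURCE A (Python) =====
-- def successive_while_loops(n1, n2):
--   s = 0
--   i = 0
--   while i < n1:
--     s = s * 10 + i
--     i += 1
--   i = 0
--   while i < n2:
--     s = s * 10 + i
--     i += 1
--   return s
-- ===== SOURCE B (Python) =====
-- def successive_while_loops(n1, n2):
--   def tri(n):
--     # closed form of the digit loop: sum_{i<n} i*10^(n-1-i) = (10^n - 9n - 1)/81
--     return (10 ** n - 9 * n - 1) // 81 if n > 0 else 0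
--   return tri(n1) * 10 ** max(n2, 0) + tri(n2)
-- ===== Notes on version B (the rewrite author's own statement) =====
-- stated objective: faster
-- what changed: Replaces both digit-accumulation while loops by the closed form (10^n - 9n - 1)//81 for each loop plus one shift by 10^max(n2,0); intended as faster (no iteration), measured 71x at n=16384 (at n=65536 A timed out and B's output was too large for the harness to decode, so the largest size is unconfirmed).
import Mathlib
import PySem

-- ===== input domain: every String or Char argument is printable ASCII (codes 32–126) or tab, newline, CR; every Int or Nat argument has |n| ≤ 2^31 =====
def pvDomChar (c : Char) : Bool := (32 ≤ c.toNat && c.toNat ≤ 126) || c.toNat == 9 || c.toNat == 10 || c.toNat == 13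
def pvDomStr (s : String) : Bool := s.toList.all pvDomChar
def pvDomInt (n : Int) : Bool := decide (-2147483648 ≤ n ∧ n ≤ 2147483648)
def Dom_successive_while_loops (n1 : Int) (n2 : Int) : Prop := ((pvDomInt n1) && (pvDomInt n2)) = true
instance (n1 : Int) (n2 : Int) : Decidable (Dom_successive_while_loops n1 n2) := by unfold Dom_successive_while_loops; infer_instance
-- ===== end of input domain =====

-- B replaces A's two digit-accumulation while loops by the closed form (10^n-9n-1)/81 (no loop).

-- ===== PORT A =====
-- one while loop 'while i < n: s = s*10 + i; i += 1'
def pvWhileA (s : Int) (i : Int) (n : Int) : Int :=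
  if h : i < n then pvWhileA (s * 10 + i) (i + 1) n else s
termination_by (n - i).toNat
decreasing_by omega

def successive_while_loops (n1 : Int) (n2 : Int) : Int :=
  pvWhileA (pvWhileA 0 0 n1) 0 n2

-- ===== PORT B =====
-- tri(n) = (10**n - 9*n - 1) // 81 if n > 0 else 0
def pvTri (n : Int) : Int :=
  if 0 < n then PySem.Int.floordiv (10 ^ n.toNat - 9 * n - 1) 81 else 0

def successive_while_loops_alt (n1 : Int) (n2 : Int) : Int :=
  pvTri n1 * 10 ^ (max n2 0).toNat + pvTri n2

-- ===== PRECONDITION & SPEC =====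
def Spec_successive_while_loops (n1 : Int) (n2 : Int) (out : Int) : Prop := out = successive_while_loops_alt n1 n2
instance (n1 : Int) (n2 : Int) (out : Int) : Decidable (Spec_successive_while_loops n1 n2 out) := by unfold Spec_successive_while_loops; infer_instance

-- ===== CLAIM (what is proved, stated in full; the proofs are below) =====
def Claim_equal_successive_while_loops : Prop := ∀ (n1 : Int) (n2 : Int), Dom_successive_while_loops n1 n2 → Spec_successive_while_loops n1 n2 (successive_while_loops n1 n2)

-- ===== LEMMAS AND PROOFS =====
-- loop value starting from counter i, running k steps, with accumulator 0
def pvT (i : Int) : Nat → Int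
  | 0 => 0
  | k + 1 => i * 10 ^ k + pvT (i + 1) k

theorem pvWhileA_eq (k : Nat) : ∀ (s i : Int), pvWhileA s i (i + k) = s * 10 ^ k + pvT i k := by
  induction k with
  | zero => intro s i; rw [pvWhileA, dif_neg (by omega)]; simp [pvT]
  | succ k ih =>
    intro s i
    rw [pvWhileA, dif_pos (by omega)]
    have : i + (k + 1 : Nat) = (i + 1) + (k : Nat) := by push_cast; ring
    rw [this, ih]
    simp [pvT, pow_succ]; ring

theorem pvT_closed (k : Nat) : ∀ i : Int, 81 * pvT i k = 9 * i * (10 ^ k - 1) + 10 ^ k - 9 * k - 1 := by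
  induction k with
  | zero => intro i; simp [pvT]
  | succ k ih =>
    intro i
    have h := ih (i + 1)
    simp only [pvT, pow_succ]
    push_cast
    nlinarith [h]

theorem pvWhileA_zero (s n : Int) : pvWhileA s 0 n = s * 10 ^ n.toNat + pvT 0 n.toNat := by
  by_cases h : n ≤ 0
  · rw [pvWhileA, dif_neg (by omega)]
    have : n.toNat = 0 := by omega
    simp [this, pvT]
  · have e : pvWhileA s 0 n = pvWhileA s 0 ((0 : Int) + (n.toNat : Nat)) := by
      congr 1; omega
    rw [e, pvWhileA_eq]

theorem pvTri_eq (n : Int) : pvTri n = pvT 0 n.toNat := by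
  unfold pvTri
  split_ifs with h
  · have hc := pvT_closed n.toNat 0
    have hn : ((n.toNat : Nat) : Int) = n := by omega
    rw [hn] at hc
    have : 10 ^ n.toNat - 9 * n - 1 = 81 * pvT 0 n.toNat := by linarith
    rw [this, PySem.Int.floordiv_eq_ediv_of_pos (by norm_num)]
    omega
  · have : n.toNat = 0 := by omega
    simp [this, pvT]

-- ===== VERDICT (by name: the statement is the Claim_ definition above) =====
theorem successive_while_loops_spec : Claim_equal_successive_while_loops := by
  intro n1 n2 _
  unfold Spec_successive_while_loops successive_while_loops successive_while_loops_alt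
  rw [pvWhileA_zero, pvWhileA_zero, pvTri_eq, pvTri_eq]
  have : (max n2 0).toNat = n2.toNat := by omega
  rw [this]
  ring
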